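-- pv_equiv track=rewrite | github.com/SimengBian/Topologies | bcube.py | switchAddr2ID
-- ===== SOURCE A (Python) =====
-- def switchAddr2ID(addr,n,k):
-- 	a = addr + []
-- 	ID = n**(k+1)
-- 	ID = ID + a[0] * n**k
-- 	i = 1
-- 	while(i<=k):
-- 		ID = ID + a[i]*n**(k-i)
-- 		i = i + 1
-- 	return ID
-- ===== SOURCE B (Python) =====
-- def switchAddr2ID(addr, n, k):
--     a = addr + []
--
--     def horner(m):
--         if m < 0:
--             return 1
--         return horner(m - 1) * n + a[m]
--
--     return horner(k)
-- ===== Notes on version B (the rewrite author's own statement) =====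
-- stated objective: simpler
-- what changed: Replaces the power computations n**(k+1), a[0]*n**k and the while loop of per-term n**(k-i) powers by a recursive Horner scheme horner(m) = horner(m-1)*n + a[m] with base case 1, descending on the index instead of iterating with powers.
-- outside the precondition, e.g. on switchAddr2ID([5, 7, 3], 2, -4721): A returns 0.0, B returns 1; on switchAddr2ID([4], 3, -1): A returns 2.333333333333333, B returns 1
import Mathlib
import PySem

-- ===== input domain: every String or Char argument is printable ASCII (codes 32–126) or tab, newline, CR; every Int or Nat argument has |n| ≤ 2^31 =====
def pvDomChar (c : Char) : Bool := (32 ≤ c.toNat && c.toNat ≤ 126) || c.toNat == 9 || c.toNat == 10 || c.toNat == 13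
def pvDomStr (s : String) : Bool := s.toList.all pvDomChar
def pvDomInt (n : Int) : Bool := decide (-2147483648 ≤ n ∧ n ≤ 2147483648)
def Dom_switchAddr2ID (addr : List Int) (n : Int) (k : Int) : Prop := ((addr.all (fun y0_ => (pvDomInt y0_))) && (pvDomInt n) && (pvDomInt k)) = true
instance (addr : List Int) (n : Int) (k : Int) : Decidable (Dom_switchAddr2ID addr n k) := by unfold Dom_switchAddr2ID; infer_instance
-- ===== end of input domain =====

-- B replaces A's iterative sum of per-term powers by a recursive Horner scheme (objective: simpler).

-- ===== PORT A =====
def switchAddr2ID (addr : List Int) (n : Int) (k : Int) : Int :=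
  let a := addr ++ []
  let ID := n ^ (k + 1).toNat
  let ID := ID + (PySem.List.pyGetD a 0 0) * n ^ k.toNat
  (PySem.List.pyRange 1 (k + 1) 1).foldl
    (fun ID i => ID + (PySem.List.pyGetD a i 0) * n ^ (k - i).toNat) ID

-- ===== PORT B =====
-- horner(m) of Source B: recursion descending on the index, base case 1 at m < 0.
def hornerB (a : List Int) (n : Int) (m : Int) : Int :=
  if m < 0 then 1
  else hornerB a n (m - 1) * n + PySem.List.pyGetD a m 0
termination_by (m + 1).toNat
decreasing_by omega

def switchAddr2ID_alt (addr : List Int) (n : Int) (k : Int) : Int :=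
  let a := addr ++ []
  hornerB a n k

-- ===== PRECONDITION & SPEC =====
-- Pre_ excludes exactly the inputs where Python A does not return an int:
-- k < 0 makes n**(k+1) or a[0]*n**k a float (or ZeroDivisionError at n = 0),
-- and addr shorter than k+1 makes a[i] raise IndexError.
def Pre_switchAddr2ID (addr : List Int) (n : Int) (k : Int) : Prop :=
  0 ≤ k ∧ k + 1 ≤ (addr.length : Int)
instance (addr : List Int) (n : Int) (k : Int) : Decidable (Pre_switchAddr2ID addr n k) := by
  unfold Pre_switchAddr2ID; infer_instance
def pvWitness_switchAddr2ID : List Int × Int × Int := ([2, 3], 4, 1)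
def Spec_switchAddr2ID (addr : List Int) (n : Int) (k : Int) (out : Int) : Prop := out = switchAddr2ID_alt addr n k
instance (addr : List Int) (n : Int) (k : Int) (out : Int) : Decidable (Spec_switchAddr2ID addr n k out) := by unfold Spec_switchAddr2ID; infer_instance

-- ===== CLAIM (what is proved, stated in full; the proofs are below) =====
def Claim_equal_switchAddr2ID : Prop := ∀ (addr : List Int) (n : Int) (k : Int), Dom_switchAddr2ID addr n k → Pre_switchAddr2ID addr n k → Spec_switchAddr2ID addr n k (switchAddr2ID addr n k)

-- ===== LEMMAS AND PROOFS =====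

-- A's additive while-loop fold is the sum of its terms.
lemma add_fold_eq (G : Int → Int) :
    ∀ (m : Nat) (c : Int), (PySem.List.pyRange 1 ((↑m : Int) + 1) 1).foldl (fun ID i => ID + G i) c
      = c + ∑ i ∈ Finset.range m, G (↑i + 1) := by
  intro m
  induction m with
  | zero => intro c; simp [PySem.List.pyRange_one_eq_nil]
  | succ m ih =>
    intro c
    rw [show ((m + 1 : Nat) : Int) + 1 = ((↑m : Int) + 1) + 1 by push_cast; ring,
        PySem.List.pyRange_one_succ_right (by omega), List.foldl_append]
    simp only [List.foldl]
    rw [ih, Finset.sum_range_succ]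
    ring

-- Both sides equal this explicit power sum.
def powerSum (a : List Int) (n : Int) (m : Nat) : Int :=
  n ^ (m + 1) + ∑ i ∈ Finset.range (m + 1), PySem.List.pyGetD a ↑i 0 * n ^ (m - i)

lemma hornerB_eq (a : List Int) (n : Int) :
    ∀ m : Nat, hornerB a n ↑m = powerSum a n m := by
  intro m
  induction m with
  | zero =>
    rw [hornerB]
    simp [powerSum, hornerB, PySem.List.pyGetD, PySem.List.pyGet?]
  | succ m ih =>
    rw [hornerB]
    have h0 : ¬ ((↑(m + 1) : Int) < 0) := by omega
    rw [if_neg h0, show ((↑(m + 1) : Int) - 1) = ↑m by push_cast; ring, ih]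
    unfold powerSum
    rw [Finset.sum_range_succ (n := m + 1)]
    have hs : (∑ i ∈ Finset.range (m + 1), PySem.List.pyGetD a ↑i 0 * n ^ (m - i)) * n
        = ∑ i ∈ Finset.range (m + 1), PySem.List.pyGetD a ↑i 0 * n ^ (m + 1 - i) := by
      rw [Finset.sum_mul]
      refine Finset.sum_congr rfl (fun i hi => ?_)
      rw [Finset.mem_range] at hi
      rw [mul_assoc, ← pow_succ]
      congr 2
      omega
    rw [add_mul, hs, ← pow_succ]
    simp only [Nat.sub_self, pow_zero, mul_one]
    ring

lemma A_eq (addr : List Int) (n : Int) (m : Nat) :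
    switchAddr2ID addr n ↑m = powerSum addr n m := by
  unfold switchAddr2ID
  simp only [List.append_nil]
  have e1 : ((↑m : Int) + 1).toNat = m + 1 := by omega
  have e2 : ((↑m : Int)).toNat = m := by omega
  rw [e1, e2, add_fold_eq]
  unfold powerSum
  rw [Finset.sum_range_succ']
  have hs : (∑ i ∈ Finset.range m, PySem.List.pyGetD addr (↑i + 1) 0 * n ^ ((↑m : Int) - (↑i + 1)).toNat)
      = ∑ i ∈ Finset.range m, PySem.List.pyGetD addr (↑(i + 1) : Int) 0 * n ^ (m - (i + 1)) := by
    refine Finset.sum_congr rfl (fun i hi => ?_)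
    rw [Finset.mem_range] at hi
    have ha : ((i + 1 : Nat) : Int) = (↑i : Int) + 1 := by push_cast; ring
    have he : ((↑m : Int) - (↑i + 1)).toNat = m - (i + 1) := by omega
    rw [ha, he]
  rw [hs]
  push_cast
  simp only [Nat.sub_zero]
  ring

-- ===== VERDICT (by name: the statement is the Claim_ definition above) =====
theorem switchAddr2ID_spec : Claim_equal_switchAddr2ID := by
  unfold Claim_equal_switchAddr2ID
  intro addr n k _hd hpre
  obtain ⟨hk, _hlen⟩ := hpre
  obtain ⟨m, rfl⟩ : ∃ m : Nat, k = ↑m := ⟨k.toNat, (Int.toNat_of_nonneg hk).symm⟩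
  unfold Spec_switchAddr2ID switchAddr2ID_alt
  simp only [List.append_nil]
  rw [A_eq, hornerB_eq]
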